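-- pv_equiv track=rewrite | github.com/fostej26/CodeForces | PartBQuestion4.py | mountainBiking
-- ===== SOURCE A (Python) =====
-- def mountainBiking(n, elevationList):
--     incline = 0
--     max_incline = 0
--     for index in range(1, n):
--         if elevationList[index] > elevationList[index - 1]:
--             incline += elevationList[index] - elevationList[index - 1]
--         else:
--             if incline > max_incline:
--                 max_incline = incline
--             incline = 0
--     if incline > max_incline:
--         max_incline = incline
--     return max_incline
-- ===== SOURCE B (Python) =====
-- def mountainBiking(n, elevationList):
--     # Segment decomposition via telescoping: each maximal uphill run [s..e]
--     # contributes elevationList[e] - elevationList[s], so list the run starts,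
--     # pair them with the run ends, and take the largest endpoint difference.
--     if n <= 1:
--         return 0
--     starts = [0] + [i for i in range(1, n)
--                     if elevationList[i] <= elevationList[i - 1]]
--     ends = [s - 1 for s in starts[1:]] + [n - 1]
--     return max(elevationList[e] - elevationList[s]
--                for s, e in zip(starts, ends))
-- ===== Notes on version B (the rewrite author's own statement) =====
-- stated objective: alternative
-- what changed: B replaces A's accumulate-and-reset diff summation with a segment decomposition: it lists the starts of maximal uphill runs, pairs each start with its run end, and takes the maximum telescoped endpoint difference elevation[end]-elevation[start]; no running climb sum is ever maintained.
import Mathlib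
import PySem

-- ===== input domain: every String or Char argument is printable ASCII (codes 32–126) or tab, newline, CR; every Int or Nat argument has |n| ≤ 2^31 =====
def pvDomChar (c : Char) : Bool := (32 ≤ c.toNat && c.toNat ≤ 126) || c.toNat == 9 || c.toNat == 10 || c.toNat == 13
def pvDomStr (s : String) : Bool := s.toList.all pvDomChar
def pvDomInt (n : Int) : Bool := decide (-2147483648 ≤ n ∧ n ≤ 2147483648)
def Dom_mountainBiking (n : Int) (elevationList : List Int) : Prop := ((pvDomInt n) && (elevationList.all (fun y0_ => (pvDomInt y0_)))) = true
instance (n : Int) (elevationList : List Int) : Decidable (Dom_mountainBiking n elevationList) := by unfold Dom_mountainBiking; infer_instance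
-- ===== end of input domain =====

-- B decomposes the profile into maximal uphill segments (a list of run starts paired with run ends)
-- and takes the maximum telescoped endpoint difference, instead of A's accumulate-and-reset diff
-- summation with a running maximum (alternative, not faster).

-- ===== PORT A =====
def mountainBiking (n : Int) (elevationList : List Int) : Int :=
  let s := (PySem.List.pyRange 1 n 1).foldl
    (fun (st : Int × Int) index =>
      if PySem.List.pyGetD elevationList index 0 > PySem.List.pyGetD elevationList (index - 1) 0 then
        (st.1 + (PySem.List.pyGetD elevationList index 0 - PySem.List.pyGetD elevationList (index - 1) 0), st.2)
      else
        (0, if st.1 > st.2 then st.1 else st.2))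
    (0, 0)
  if s.1 > s.2 then s.1 else s.2

-- ===== PORT B =====
def mountainBiking_alt (n : Int) (elevationList : List Int) : Int :=
  if n ≤ 1 then 0
  else
    let starts := 0 :: ((PySem.List.pyRange 1 n 1).filter
        (fun i => PySem.List.pyGetD elevationList i 0 ≤ PySem.List.pyGetD elevationList (i - 1) 0))
    let ends := (starts.drop 1).map (fun s => s - 1) ++ [n - 1]
    match (starts.zip ends).map
        (fun p => PySem.List.pyGetD elevationList p.2 0 - PySem.List.pyGetD elevationList p.1 0) with
    | [] => 0      -- unreachable: starts is nonempty and ends is nonempty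
    | v :: vs => vs.foldl max v

-- ===== PRECONDITION & SPEC =====
-- Pre_ excludes exactly the inputs where Python A raises IndexError (an index in range(1, n) beyond the list).
def Pre_mountainBiking (n : Int) (elevationList : List Int) : Prop := n ≤ elevationList.length ∨ n ≤ 1
instance (n : Int) (elevationList : List Int) : Decidable (Pre_mountainBiking n elevationList) := by unfold Pre_mountainBiking; infer_instance
def pvWitness_mountainBiking : Int × List Int := (4, [1, 3, 2, 5])

def Spec_mountainBiking (n : Int) (elevationList : List Int) (out : Int) : Prop := out = mountainBiking_alt n elevationList
instance (n : Int) (elevationList : List Int) (out : Int) : Decidable (Spec_mountainBiking n elevationList out) := by unfold Spec_mountainBiking; infer_instance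

-- ===== CLAIM (what is proved, stated in full; the proofs are below) =====
def Claim_equal_mountainBiking : Prop := ∀ (n : Int) (elevationList : List Int), Dom_mountainBiking n elevationList → Pre_mountainBiking n elevationList → Spec_mountainBiking n elevationList (mountainBiking n elevationList)

-- ===== LEMMAS AND PROOFS =====

-- the per-run climb sums, one entry per maximal uphill run of the diff list
def pvSums (ds : List Int) : List Int :=
  ds.foldr (fun d sums => if d > 0 then (sums.head! + d) :: sums.tail else 0 :: sums) [0]

-- add c to the head of a list
def pvBump (c : Int) : List Int → List Int
  | [] => []
  | h :: t => (h + c) :: t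

theorem pvSums_shape (ds : List Int) : ∃ s t, pvSums ds = s :: t ∧ 0 ≤ s := by
  induction ds with
  | nil => exact ⟨0, [], rfl, le_refl 0⟩
  | cons d ds ih =>
    obtain ⟨s, t, hst, hs⟩ := ih
    by_cases hd : d > 0
    · exact ⟨s + d, t, by simp [pvSums] at hst ⊢; rw [hst]; simp [hd], by omega⟩
    · exact ⟨0, pvSums ds, by simp [pvSums] at hst ⊢; simp [hd], le_refl 0⟩

-- A's loop over the diffs list equals "fold max over the run sums with the head adjusted"
theorem pvMain (ds : List Int) (inc mx s : Int) (t : List Int) (h : pvSums ds = s :: t) :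
    (let r := ds.foldl
        (fun (st : Int × Int) d => if d > 0 then (st.1 + d, st.2) else (0, if st.1 > st.2 then st.1 else st.2))
        (inc, mx)
     if r.1 > r.2 then r.1 else r.2) = t.foldl max (max mx (inc + s)) := by
  induction ds generalizing inc mx s t with
  | nil =>
    simp [pvSums] at h
    obtain ⟨hs, ht⟩ := h
    subst hs; subst ht
    simp only [List.foldl]
    split <;> omega
  | cons d ds ih =>
    obtain ⟨s', t', hst, _⟩ := pvSums_shape ds
    by_cases hd : d > 0
    · have hsum : pvSums (d :: ds) = (s' + d) :: t' := by
        simp [pvSums] at hst ⊢; rw [hst]; simp [hd]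
      rw [hsum] at h
      obtain ⟨hs, ht⟩ := List.cons.inj h
      subst hs; subst ht
      simp only [List.foldl, hd, if_pos]
      rw [ih (inc + d) mx s' t' hst]
      congr 1; omega
    · have hsum : pvSums (d :: ds) = 0 :: s' :: t' := by
        simp [pvSums] at hst ⊢; rw [hst]; simp [hd]
      rw [hsum] at h
      obtain ⟨hs, ht⟩ := List.cons.inj h
      subst hs; subst ht
      simp only [List.foldl, hd, if_neg, not_false_iff]
      rw [ih 0 (if inc > mx then inc else mx) s' t' hst]
      congr 1
      split <;> omega

-- pvSums on a cons, by definitional unfolding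
theorem pvSums_cons (d : Int) (ds : List Int) :
    pvSums (d :: ds) = if d > 0 then ((pvSums ds).head! + d) :: (pvSums ds).tail else 0 :: pvSums ds := rfl

-- B's segment values (telescoped endpoint differences) are exactly the run sums,
-- with the head adjusted by the climb already inside the current run.
theorem pvSeg (l : List Int) (n : Int) (a s : Int) (h : a ≤ n) :
    ((s :: ((PySem.List.pyRange a n 1).filter
        (fun i => PySem.List.pyGetD l i 0 ≤ PySem.List.pyGetD l (i - 1) 0))).zip
      ((((PySem.List.pyRange a n 1).filter
        (fun i => PySem.List.pyGetD l i 0 ≤ PySem.List.pyGetD l (i - 1) 0)).map (fun x => x - 1)) ++ [n - 1])).map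
      (fun p => PySem.List.pyGetD l p.2 0 - PySem.List.pyGetD l p.1 0)
    = pvBump (PySem.List.pyGetD l (a - 1) 0 - PySem.List.pyGetD l s 0)
        (pvSums ((PySem.List.pyRange a n 1).map
          (fun i => PySem.List.pyGetD l i 0 - PySem.List.pyGetD l (i - 1) 0))) := by
  induction hfuel : (n - a).toNat generalizing a s with
  | zero =>
    have ha : n ≤ a := by omega
    rw [PySem.List.pyRange_one_eq_nil ha]
    have han : a = n := by omega
    subst han
    simp [pvSums, pvBump]
  | succ k ih =>
    have ha : a < n := by omega
    rw [PySem.List.pyRange_one_cons ha]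
    have hk : (n - (a + 1)).toNat = k := by omega
    obtain ⟨s', t', hst, _⟩ := pvSums_shape ((PySem.List.pyRange (a + 1) n 1).map
        (fun i => PySem.List.pyGetD l i 0 - PySem.List.pyGetD l (i - 1) 0))
    by_cases hc : PySem.List.pyGetD l a 0 ≤ PySem.List.pyGetD l (a - 1) 0
    · -- a is a run start: emit the finished segment (s, a-1) and recurse with start a
      have hih := ih (a + 1) a (by omega) hk
      simp only [show a + 1 - 1 = a by ring, sub_self] at hih
      have hsum : pvSums ((PySem.List.pyGetD l a 0 - PySem.List.pyGetD l (a - 1) 0) ::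
          (PySem.List.pyRange (a + 1) n 1).map
            (fun i => PySem.List.pyGetD l i 0 - PySem.List.pyGetD l (i - 1) 0)) = 0 :: s' :: t' := by
        rw [pvSums_cons, hst, if_neg (by omega)]
      simp only [List.filter_cons, hc, decide_true, if_pos, List.map_cons, List.cons_append,
        List.zip_cons_cons]
      rw [hih, hst, hsum]
      simp [pvBump]
    · -- still climbing: the current segment's head absorbs the diff at a
      have hih := ih (a + 1) s (by omega) hk
      simp only [show a + 1 - 1 = a by ring] at hih
      have hsum : pvSums ((PySem.List.pyGetD l a 0 - PySem.List.pyGetD l (a - 1) 0) ::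
          (PySem.List.pyRange (a + 1) n 1).map
            (fun i => PySem.List.pyGetD l i 0 - PySem.List.pyGetD l (i - 1) 0))
          = (s' + (PySem.List.pyGetD l a 0 - PySem.List.pyGetD l (a - 1) 0)) :: t' := by
        rw [pvSums_cons, hst, if_pos (by omega)]
        rfl
      simp only [List.filter_cons, hc, decide_false, Bool.false_eq_true, if_neg, not_false_iff,
        List.map_cons]
      rw [hih, hst, hsum]
      simp only [pvBump, List.cons.injEq, and_true]
      omega

-- ===== VERDICT (by name: the statement is the Claim_ definition above) =====
theorem mountainBiking_spec : Claim_equal_mountainBiking := by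
  intro n elevationList _ _
  unfold Spec_mountainBiking mountainBiking mountainBiking_alt
  by_cases hn : n ≤ 1
  · rw [if_pos hn, PySem.List.pyRange_one_eq_nil hn]
    simp
  · rw [if_neg hn]
    set ds := (PySem.List.pyRange 1 n 1).map
        (fun i => PySem.List.pyGetD elevationList i 0 - PySem.List.pyGetD elevationList (i - 1) 0) with hds
    have hfold : ds.foldl
        (fun (st : Int × Int) d => if d > 0 then (st.1 + d, st.2) else (0, if st.1 > st.2 then st.1 else st.2)) (0, 0)
        = (PySem.List.pyRange 1 n 1).foldl
        (fun (st : Int × Int) index =>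
          if PySem.List.pyGetD elevationList index 0 > PySem.List.pyGetD elevationList (index - 1) 0 then
            (st.1 + (PySem.List.pyGetD elevationList index 0 - PySem.List.pyGetD elevationList (index - 1) 0), st.2)
          else
            (0, if st.1 > st.2 then st.1 else st.2)) (0, 0) := by
      rw [hds, List.foldl_map]
      apply PySem.List.foldl_congr_mem
      intro st i _
      by_cases hc : PySem.List.pyGetD elevationList i 0 > PySem.List.pyGetD elevationList (i - 1) 0
      · rw [if_pos (by omega), if_pos hc]
      · rw [if_neg (by omega), if_neg hc]
    obtain ⟨s, t, hst, hs⟩ := pvSums_shape ds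
    have hseg := pvSeg elevationList n 1 0 (by omega)
    rw [← hds] at hseg
    rw [hst] at hseg
    simp only [pvBump, sub_self, add_zero] at hseg
    simp only [List.drop_one]
    rw [show ((0 : Int) :: (PySem.List.pyRange 1 n 1).filter
        (fun i => PySem.List.pyGetD elevationList i 0 ≤ PySem.List.pyGetD elevationList (i - 1) 0)).tail
      = (PySem.List.pyRange 1 n 1).filter
        (fun i => PySem.List.pyGetD elevationList i 0 ≤ PySem.List.pyGetD elevationList (i - 1) 0) from rfl]
    rw [hseg]
    rw [← hfold]
    have := pvMain ds 0 0 s t hst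
    simp only at this
    rw [this]
    have : max 0 (0 + s) = s := by omega
    rw [this]
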